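-- pv_equiv track=rewrite | github.com/anushka21187/network_path_finder | common.py | available_ports
-- ===== SOURCE A (Python) =====
-- def network_matrix(r, c):
--
--     matrix = []
--     node_id = 0
--
--     for row_index in range (0, r):
--         matrix_row = []
--         for col_index in range (0, c):
--             matrix_row.append(node_id)
--             node_id = node_id + 1
--         matrix.append(tuple(matrix_row))
--     return tuple(matrix)
--
-- def available_ports(topology, r, c):
--
--     network = network_matrix(r, c)
--
--     available_directions = {}
--
--     if topology=='torus':
--         list_of_directions = ['N', 'S', 'W', 'E']
--         for row_index in range (0, len(network)):
--             for col_index in range (0, len(network[row_index])):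
--                 available_directions[network[row_index][col_index]] = \
--                 list_of_directions
--
--     elif topology=='mesh':
--         for row_index in range (0, len(network)):
--             list_of_directions = []
--             if row_index==0:
--                 list_of_directions.append('S')
--
--             elif row_index==len(network)-1:
--                 list_of_directions.append('N')
--
--             else:
--                 list_of_directions.extend(['N', 'S'])
--
--             for col_index in range (0, len(network[row_index])):
--
--                 if col_index==0:
--                     list_of_directions.append('E')
--                     available_directions[network[row_index][col_index]] = tuple(list_of_directions)
--                     del(list_of_directions[-1])
--
--                 elif col_index==len(network[row_index])-1:
--                     list_of_directions.append('W')
--                     available_directions[network[row_index][col_index]] = tuple(list_of_directions)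
--                     del(list_of_directions[-1])
--                 else:
--                     list_of_directions.extend(['W', 'E'])
--                     available_directions[network[row_index][col_index]] = tuple(list_of_directions)
--                     del(list_of_directions[-2:])
--
--     return available_directions
-- ===== SOURCE B (Python) =====
-- def available_ports(topology, r, c):
--     rr, cc = max(r, 0), max(c, 0)
--     if topology == 'torus':
--         dirs = ['N', 'S', 'W', 'E']
--         return {i: dirs for i in range(rr * cc)}
--     if topology != 'mesh' or rr == 0 or cc == 0:
--         return {}
--     def row_values(vert):
--         if cc == 1:
--             return [vert + ('E',)]
--         return [vert + ('E',)] + [vert + ('W', 'E')] * (cc - 2) + [vert + ('W',)]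
--     if rr == 1:
--         rows = [row_values(('S',))]
--     else:
--         rows = [row_values(('S',))] + [row_values(('N', 'S'))] * (rr - 2) + [row_values(('N',))]
--     flat = [v for row in rows for v in row]
--     return dict(enumerate(flat))
-- ===== Notes on version B (the rewrite author's own statement) =====
-- stated objective: alternative
-- what changed: B replaces A's per-cell nested loop with boundary branching by a replicate-and-concatenate construction (each mesh row's value list built once as [first]+[middle]*(c-2)+[last], rows likewise, then dict(enumerate(flat)); torus as one comprehension over range(r*c)) and never builds A's node-ID matrix, so unknown topologies cost O(1) instead of A's O(r*c) matrix construction.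
import Mathlib
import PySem

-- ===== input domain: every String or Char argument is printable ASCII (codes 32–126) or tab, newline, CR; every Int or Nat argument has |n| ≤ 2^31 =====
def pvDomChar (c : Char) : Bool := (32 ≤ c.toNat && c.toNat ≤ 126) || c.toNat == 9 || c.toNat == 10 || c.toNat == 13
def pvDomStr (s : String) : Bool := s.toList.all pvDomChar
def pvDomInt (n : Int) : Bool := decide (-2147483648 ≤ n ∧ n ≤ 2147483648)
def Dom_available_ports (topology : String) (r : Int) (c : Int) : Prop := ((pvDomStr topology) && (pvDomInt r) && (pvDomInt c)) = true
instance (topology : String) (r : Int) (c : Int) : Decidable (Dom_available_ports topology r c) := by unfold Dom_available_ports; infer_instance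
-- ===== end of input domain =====

-- B builds the mesh answer by replicate-and-concatenate (each row's values as
-- [first]+[middle]*(c-2)+[last], rows likewise, then dict(enumerate(flat))) instead of A's
-- per-cell nested loop with boundary branching (objective: alternative).

-- ===== PORT A =====
def network_matrix (r : Int) (c : Int) : List (List Int) :=
  ((PySem.List.pyRange 0 r 1).foldl
    (fun (st : List (List Int) × Int) _ =>
      let inner := (PySem.List.pyRange 0 c 1).foldl
        (fun (st2 : List Int × Int) _ => (st2.1 ++ [st2.2], st2.2 + 1)) ([], st.2)
      (st.1 ++ [inner.1], inner.2))
    ([], 0)).1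

def available_ports (topology : String) (r : Int) (c : Int) : List (Int × List String) :=
  let network := network_matrix r c
  if topology = "torus" then
    let lod : List String := ["N", "S", "W", "E"]
    ((PySem.List.pyRange 0 (network.length : Int) 1).foldl
      (fun (d : PySem.Dict Int (List String)) ri =>
        (PySem.List.pyRange 0 ((PySem.List.pyGetD network ri []).length : Int) 1).foldl
          (fun d2 ci =>
            d2.insert (PySem.List.pyGetD (PySem.List.pyGetD network ri []) ci 0) lod) d)
      PySem.Dict.empty).items
  else if topology = "mesh" then
    ((PySem.List.pyRange 0 (network.length : Int) 1).foldl
      (fun (d : PySem.Dict Int (List String)) ri =>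
        let lod : List String :=
          if ri = 0 then ["S"]
          else if ri = (network.length : Int) - 1 then ["N"]
          else ["N", "S"]
        (PySem.List.pyRange 0 ((PySem.List.pyGetD network ri []).length : Int) 1).foldl
          (fun d2 ci =>
            if ci = 0 then
              d2.insert (PySem.List.pyGetD (PySem.List.pyGetD network ri []) ci 0) (lod ++ ["E"])
            else if ci = ((PySem.List.pyGetD network ri []).length : Int) - 1 then
              d2.insert (PySem.List.pyGetD (PySem.List.pyGetD network ri []) ci 0) (lod ++ ["W"])
            else
              d2.insert (PySem.List.pyGetD (PySem.List.pyGetD network ri []) ci 0) (lod ++ ["W", "E"])) d)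
      PySem.Dict.empty).items
  else []

-- ===== PORT B =====
def available_ports_alt (topology : String) (r : Int) (c : Int) : List (Int × List String) :=
  let rr := max r 0
  let cc := max c 0
  if topology = "torus" then
    let dirs : List String := ["N", "S", "W", "E"]
    ((PySem.List.pyRange 0 (rr * cc) 1).foldl
      (fun (d : PySem.Dict Int (List String)) i => d.insert i dirs) PySem.Dict.empty).items
  else if topology ≠ "mesh" ∨ rr = 0 ∨ cc = 0 then []
  else
    let rowValues : List String → List (List String) := fun vert =>
      if cc = 1 then [vert ++ ["E"]]
      else [vert ++ ["E"]] ++ List.replicate (cc - 2).toNat (vert ++ ["W", "E"]) ++ [vert ++ ["W"]]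
    let rows : List (List (List String)) :=
      if rr = 1 then [rowValues ["S"]]
      else [rowValues ["S"]] ++ List.replicate (rr - 2).toNat (rowValues ["N", "S"]) ++ [rowValues ["N"]]
    let flat := rows.flatten
    ((PySem.List.enumerate flat 0).foldl
      (fun (d : PySem.Dict Int (List String)) p => d.insert p.1 p.2) PySem.Dict.empty).items

-- ===== PRECONDITION & SPEC =====
def Spec_available_ports (topology : String) (r : Int) (c : Int) (out : List (Int × List String)) : Prop := out = available_ports_alt topology r c
instance (topology : String) (r : Int) (c : Int) (out : List (Int × List String)) : Decidable (Spec_available_ports topology r c out) := by unfold Spec_available_ports; infer_instance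

-- ===== CLAIM (what is proved, stated in full; the proofs are below) =====
def Claim_equal_available_ports : Prop := ∀ (topology : String) (r : Int) (c : Int), Dom_available_ports topology r c → Spec_available_ports topology r c (available_ports topology r c)

-- ===== LEMMAS AND PROOFS =====

-- the common flat key/value pair list both dicts are built from
def pvPairs (r c : Int) (V H : Int → List String) : List (Int × List String) :=
  (PySem.List.pyRange 0 r 1).flatMap
    (fun ri => (PySem.List.pyRange 0 c 1).map (fun ci => (ri * c + ci, V ri ++ H ci)))

-- ----- characterisation of A's network matrix (A-side helpers) -----
theorem pv_inner_mat (l : List Int) : ∀ (acc : List Int) (n : Int),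
    l.foldl (fun (st2 : List Int × Int) _ => (st2.1 ++ [st2.2], st2.2 + 1)) (acc, n)
      = (acc ++ PySem.List.pyRange n (n + (l.length : Int)) 1, n + (l.length : Int)) := by
  induction l with
  | nil => intro acc n; simp
  | cons x xs ih =>
    intro acc n
    simp only [List.foldl_cons]
    rw [ih (acc ++ [n]) (n + 1)]
    have e1 : n + 1 + (xs.length : Int) = n + (((x :: xs).length : Nat) : Int) := by
      simp only [List.length_cons]; push_cast; ring
    rw [e1, PySem.List.pyRange_one_cons
      (by simp only [List.length_cons]; omega : n < n + (((x :: xs).length : Nat) : Int))]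
    simp

theorem pv_outer_mat (c : Int) (l : List Int) : ∀ (acc : List (List Int)) (n : Int),
    l.foldl (fun (st : List (List Int) × Int) _ =>
        let inner := (PySem.List.pyRange 0 c 1).foldl
          (fun (st2 : List Int × Int) _ => (st2.1 ++ [st2.2], st2.2 + 1)) ([], st.2)
        (st.1 ++ [inner.1], inner.2)) (acc, n)
      = (acc ++ (List.range l.length).map (fun (k : Nat) =>
            PySem.List.pyRange (n + (k : Int) * (c.toNat : Int)) (n + (k : Int) * (c.toNat : Int) + (c.toNat : Int)) 1),
          n + (l.length : Int) * (c.toNat : Int)) := by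
  have hlen : ((PySem.List.pyRange 0 c 1).length : Int) = (c.toNat : Int) := by
    rw [PySem.List.length_pyRange_one]; omega
  induction l with
  | nil => intro acc n; simp
  | cons x xs ih =>
    intro acc n
    simp only [List.foldl_cons, pv_inner_mat, hlen] at ih ⊢
    rw [ih]
    simp only [Prod.mk.injEq]
    constructor
    · simp only [List.length_cons]
      rw [List.range_succ_eq_map]
      simp only [List.map_cons, List.map_map, List.append_assoc, List.singleton_append,
        Nat.cast_zero, zero_mul, add_zero, List.nil_append]
      congr 1
      congr 1
      apply List.map_congr_left
      intro k _
      simp only [Function.comp_apply]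
      congr 1 <;> push_cast <;> ring
    · simp only [List.length_cons]; push_cast; ring

theorem pv_netmat (r c : Int) :
    network_matrix r c = (List.range r.toNat).map (fun (k : Nat) =>
      PySem.List.pyRange ((k : Int) * (c.toNat : Int)) ((k : Int) * (c.toNat : Int) + (c.toNat : Int)) 1) := by
  unfold network_matrix
  rw [pv_outer_mat]
  have hlen : (PySem.List.pyRange 0 r 1).length = r.toNat := by
    rw [PySem.List.length_pyRange_one]; omega
  rw [hlen]
  apply List.map_congr_left
  intro k _
  congr 1 <;> ring

theorem pv_net_len (r c : Int) : ((network_matrix r c).length : Int) = (r.toNat : Int) := by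
  rw [pv_netmat]; simp

theorem pv_net_get (r c ri : Int) (h0 : 0 ≤ ri) (h1 : ri < (r.toNat : Int)) :
    PySem.List.pyGetD (network_matrix r c) ri []
      = PySem.List.pyRange (ri * (c.toNat : Int)) (ri * (c.toNat : Int) + (c.toNat : Int)) 1 := by
  rw [pv_netmat, PySem.List.pyGetD_eq_getElem _ _ h0 (by simpa using h1)]
  simp only [List.getElem_map, List.getElem_range]
  congr 2 <;> rw [Int.toNat_of_nonneg h0]

theorem pv_range_len (a b : Int) (h : 0 ≤ b) :
    ((PySem.List.pyRange a (a + b) 1).length : Int) = b := by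
  rw [PySem.List.length_pyRange_one]; omega

theorem pv_range_get (a b j : Int) (d : Int) (h0 : 0 ≤ j) (h1 : j < b - a) :
    PySem.List.pyGetD (PySem.List.pyRange a b 1) j d = a + j := by
  rw [PySem.List.pyRange_one, PySem.List.pyGetD_eq_getElem _ _ h0 (by simp; omega)]
  simp only [List.getElem_map, List.getElem_range]
  rw [Int.toNat_of_nonneg h0]

theorem pv_cast_range (r : Int) :
    PySem.List.pyRange 0 ((r.toNat : Int)) 1 = PySem.List.pyRange 0 r 1 := by
  rw [PySem.List.pyRange_one, PySem.List.pyRange_one]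
  congr 2
  omega

-- ----- shared list machinery -----
theorem pv_map_shift {t c : Int} :
    (PySem.List.pyRange 0 c 1).map (fun ci => t + ci) = PySem.List.pyRange t (t + c) 1 := by
  rw [PySem.List.pyRange_zero, PySem.List.pyRange_one]
  have h : t + c - t = c := by ring
  rw [h, List.map_map]
  rfl

theorem pv_keys_concat (c : Int) (hc : 0 ≤ c) : ∀ n : Nat,
    (PySem.List.pyRange 0 (n : Int) 1).flatMap
        (fun t => (PySem.List.pyRange 0 c 1).map (fun ci => t * c + ci))
      = PySem.List.pyRange 0 ((n : Int) * c) 1 := by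
  intro n
  induction n with
  | zero =>
    rw [show ((0 : Nat) : Int) = 0 by rfl, PySem.List.pyRange_one_eq_nil (le_refl 0)]
    rw [show (0 : Int) * c = 0 by ring, PySem.List.pyRange_one_eq_nil (le_refl 0)]
    rfl
  | succ m ih =>
    rw [show (((m + 1 : Nat)) : Int) = (m : Int) + 1 by push_cast; ring,
      PySem.List.pyRange_one_succ_right (by positivity), List.flatMap_append, ih]
    simp only [List.flatMap_cons, List.flatMap_nil, List.append_nil]
    rw [show (fun ci => (m : Int) * c + ci) = (fun ci => ((m : Int) * c) + ci) by rfl, pv_map_shift]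
    rw [← PySem.List.pyRange_one_append 0 ((m : Int) * c) ((m : Int) * c + c) (by positivity) (by omega)]
    congr 1
    ring

theorem pv_enum_append {α : Type} (xs ys : List α) : ∀ s : Int,
    PySem.List.enumerate (xs ++ ys) s
      = PySem.List.enumerate xs s ++ PySem.List.enumerate ys (s + (xs.length : Int)) := by
  induction xs with
  | nil => intro s; simp [PySem.List.enumerate_nil]
  | cons x xs ih =>
    intro s
    simp only [List.cons_append, PySem.List.enumerate_cons, ih (s + 1), List.length_cons]
    congr 3
    push_cast
    ring

theorem pv_enum_map_range {α : Type} (g : Nat → α) : ∀ (m : Nat) (s : Int),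
    PySem.List.enumerate ((List.range m).map g) s
      = (List.range m).map (fun (k : Nat) => (s + (k : Int), g k)) := by
  intro m
  induction m with
  | zero => intro s; simp [PySem.List.enumerate_nil]
  | succ m ih =>
    intro s
    rw [List.range_succ, List.map_append, List.map_append, pv_enum_append, ih]
    simp [PySem.List.enumerate_cons, PySem.List.enumerate_nil]

theorem pv_enum_map_pyRange {α : Type} (g : Int → α) (c : Int) (s : Int) :
    PySem.List.enumerate ((PySem.List.pyRange 0 c 1).map g) s
      = (PySem.List.pyRange 0 c 1).map (fun ci => (s + ci, g ci)) := by
  rw [PySem.List.pyRange_zero c, List.map_map, List.map_map]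
  exact pv_enum_map_range (fun k => g (k : Int)) c.toNat s

-- segment construction [first] ++ [middle]*(n-2) ++ [last] = the boundary-branching map
theorem pv_seg {α : Type} (n : Int) (hn : 1 ≤ n) (f0 fm fl : α) :
    (if n = 1 then [f0] else [f0] ++ List.replicate (n - 2).toNat fm ++ [fl])
      = (PySem.List.pyRange 0 n 1).map (fun i => if i = 0 then f0 else if i = n - 1 then fl else fm) := by
  by_cases h1 : n = 1
  · subst h1
    rw [PySem.List.pyRange_one_cons (by omega), PySem.List.pyRange_one_eq_nil (by omega)]
    simp
  · have h2 : 2 ≤ n := by omega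
    have e0 : PySem.List.pyRange 0 1 1 = [0] := by
      rw [PySem.List.pyRange_one_cons (by omega), PySem.List.pyRange_one_eq_nil (by omega)]
    have eL : PySem.List.pyRange (n - 1) n 1 = [n - 1] := by
      rw [PySem.List.pyRange_one_cons (by omega), PySem.List.pyRange_one_eq_nil (by omega)]
    rw [if_neg h1,
      PySem.List.pyRange_one_append 0 1 n (by omega) (by omega),
      PySem.List.pyRange_one_append 1 (n - 1) n (by omega) (by omega), e0, eL]
    simp only [List.map_append, List.map_cons, List.map_nil,
      if_neg (show ¬ (n - 1 : Int) = 0 by omega), if_true]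
    simp only [List.cons_append, List.nil_append]
    congr 2
    rw [List.map_congr_left (g := fun _ => fm)
      (fun i hi => by
        rw [PySem.List.mem_pyRange_one] at hi
        rw [if_neg (by omega), if_neg (by omega)]),
      List.map_const', PySem.List.length_pyRange_one]
    congr 1
    omega

-- keys of pvPairs form the range 0 .. r*c-1, hence are nodup
theorem pv_pairs_keys (r c : Int) (hr : 0 ≤ r) (hc : 0 ≤ c) (V H : Int → List String) :
    (pvPairs r c V H).map Prod.fst = PySem.List.pyRange 0 (r * c) 1 := by
  unfold pvPairs
  rw [List.map_flatMap]
  simp only [List.map_map, Function.comp_def]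
  have hrr : ((r.toNat : Int)) = r := by omega
  rw [← hrr]
  exact pv_keys_concat c hc r.toNat

theorem pv_items_pairs (r c : Int) (hr : 0 ≤ r) (hc : 0 ≤ c) (V H : Int → List String) :
    ((pvPairs r c V H).foldl (fun (d : PySem.Dict Int (List String)) p => d.insert p.1 p.2)
        PySem.Dict.empty).items = pvPairs r c V H := by
  rw [PySem.Dict.items_foldl_insert_fresh (pvPairs r c V H) Prod.fst Prod.snd PySem.Dict.empty
    (fun a _ => PySem.Dict.contains_empty _)
    (by rw [pv_pairs_keys r c hr hc]; exact PySem.List.nodup_pyRange_one _ _)]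
  simp [PySem.Dict.empty]

-- A's clean nested insert loop produces exactly pvPairs
theorem pv_clean_items (r c : Int) (hr : 0 ≤ r) (hc : 0 ≤ c) (V H : Int → List String) :
    ((PySem.List.pyRange 0 r 1).foldl
        (fun (d : PySem.Dict Int (List String)) ri =>
          (PySem.List.pyRange 0 c 1).foldl
            (fun d2 ci => d2.insert (ri * c + ci) (V ri ++ H ci)) d)
        PySem.Dict.empty).items = pvPairs r c V H := by
  have h : (pvPairs r c V H).foldl (fun (d : PySem.Dict Int (List String)) p => d.insert p.1 p.2)
      PySem.Dict.empty
      = (PySem.List.pyRange 0 r 1).foldl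
          (fun (d : PySem.Dict Int (List String)) ri =>
            (PySem.List.pyRange 0 c 1).foldl
              (fun d2 ci => d2.insert (ri * c + ci) (V ri ++ H ci)) d)
          PySem.Dict.empty := by
    unfold pvPairs
    rw [List.foldl_flatMap]
    simp only [List.foldl_map]
  rw [← h, pv_items_pairs r c hr hc]

-- A's loop body rewritten to the clean insert loop (main case 1 ≤ r, 1 ≤ c)
theorem pv_a_torus (r c : Int) (hr : 1 ≤ r) (hc : 1 ≤ c) :
    available_ports "torus" r c = pvPairs r c (fun _ => ["N", "S"]) (fun _ => ["W", "E"]) := by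
  simp only [available_ports, reduceIte]
  rw [pv_net_len, pv_cast_range]
  rw [← pv_clean_items r c (by omega) (by omega)]
  apply congrArg PySem.Dict.items
  apply PySem.List.foldl_congr_mem
  intro acc ri hri
  rw [PySem.List.mem_pyRange_one] at hri
  have hrt : ri < (r.toNat : Int) := by omega
  rw [pv_net_get r c ri hri.1 hrt]
  have hcc : (c.toNat : Int) = c := by omega
  rw [hcc, pv_range_len _ c (by omega)]
  apply PySem.List.foldl_congr_mem
  intro acc2 ci hci
  rw [PySem.List.mem_pyRange_one] at hci
  rw [pv_range_get _ _ ci 0 hci.1 (by ring_nf; omega)]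
  rfl

theorem pv_a_mesh (r c : Int) (hr : 1 ≤ r) (hc : 1 ≤ c) :
    available_ports "mesh" r c
      = pvPairs r c
          (fun ri => if ri = 0 then ["S"] else if ri = r - 1 then ["N"] else ["N", "S"])
          (fun ci => if ci = 0 then ["E"] else if ci = c - 1 then ["W"] else ["W", "E"]) := by
  simp only [available_ports, reduceIte]
  rw [pv_net_len, pv_cast_range]
  rw [← pv_clean_items r c (by omega) (by omega)]
  apply congrArg PySem.Dict.items
  apply PySem.List.foldl_congr_mem
  intro acc ri hri
  rw [PySem.List.mem_pyRange_one] at hri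
  have hrr : ((r.toNat : Int)) = r := by omega
  have hrt : ri < (r.toNat : Int) := by omega
  rw [pv_net_get r c ri hri.1 hrt, hrr]
  have hcc : (c.toNat : Int) = c := by omega
  rw [hcc, pv_range_len _ c (by omega)]
  apply PySem.List.foldl_congr_mem
  intro acc2 ci hci
  rw [PySem.List.mem_pyRange_one] at hci
  rw [pv_range_get _ _ ci 0 hci.1 (by ring_nf; omega)]
  split_ifs <;> rfl

-- B's enumerated flat list equals pvPairs (main case)
theorem pv_enum_flat (c : Int) (hc : 0 ≤ c) {α : Type} (g : Int → Int → α) : ∀ n : Nat,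
    PySem.List.enumerate
        ((PySem.List.pyRange 0 (n : Int) 1).flatMap (fun t => (PySem.List.pyRange 0 c 1).map (g t))) 0
      = (PySem.List.pyRange 0 (n : Int) 1).flatMap
          (fun t => (PySem.List.pyRange 0 c 1).map (fun ci => (t * c + ci, g t ci))) := by
  intro n
  induction n with
  | zero =>
    rw [show ((0 : Nat) : Int) = 0 by rfl, PySem.List.pyRange_one_eq_nil (le_refl 0)]
    rfl
  | succ m ih =>
    rw [show (((m + 1 : Nat)) : Int) = (m : Int) + 1 by push_cast; ring,
      PySem.List.pyRange_one_succ_right (by positivity),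
      List.flatMap_append, List.flatMap_append, pv_enum_append, ih]
    simp only [List.flatMap_cons, List.flatMap_nil, List.append_nil]
    congr 1
    have hcc : ((c.toNat : Int)) = c := by omega
    have hlen : ((((PySem.List.pyRange 0 (m : Int) 1).flatMap
        (fun t => (PySem.List.pyRange 0 c 1).map (g t))).length : Nat) : Int) = (m : Int) * c := by
      rw [List.length_flatMap]
      simp only [List.length_map, PySem.List.length_pyRange_one]
      rw [List.map_const', List.sum_replicate_nat, PySem.List.length_pyRange_one,
        Nat.cast_mul, show ((m : Int) - 0).toNat = m by omega,
        show ((c : Int) - 0).toNat = c.toNat by omega, hcc]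
    rw [show ((0 : Int) + (((PySem.List.pyRange 0 (m : Int) 1).flatMap
          (fun t => (PySem.List.pyRange 0 c 1).map (g t))).length : Int))
        = ((((PySem.List.pyRange 0 (m : Int) 1).flatMap
          (fun t => (PySem.List.pyRange 0 c 1).map (g t))).length : Int)) by ring, hlen,
      pv_enum_map_pyRange]

theorem pv_b_mesh (r c : Int) (hr : 1 ≤ r) (hc : 1 ≤ c) :
    available_ports_alt "mesh" r c
      = pvPairs r c
          (fun ri => if ri = 0 then ["S"] else if ri = r - 1 then ["N"] else ["N", "S"])
          (fun ci => if ci = 0 then ["E"] else if ci = c - 1 then ["W"] else ["W", "E"]) := by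
  obtain ⟨n, rfl⟩ : ∃ n : Nat, r = (n : Int) := ⟨r.toNat, by omega⟩
  have hmr : max ((n : Int)) 0 = (n : Int) := by omega
  have hmc : max c 0 = c := by omega
  simp only [available_ports_alt, hmr, hmc]
  rw [if_neg (by decide : ¬ ("mesh" : String) = "torus"),
    if_neg (by simp only [not_or, ne_eq, not_not]; exact ⟨trivial, by omega, by omega⟩)]
  have hrow : ∀ vert : List String,
      (if c = 1 then [vert ++ ["E"]]
        else [vert ++ ["E"]] ++ List.replicate (c - 2).toNat (vert ++ ["W", "E"]) ++ [vert ++ ["W"]])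
        = (PySem.List.pyRange 0 c 1).map
            (fun ci => vert ++ (if ci = 0 then ["E"] else if ci = c - 1 then ["W"] else ["W", "E"])) := by
    intro vert
    rw [pv_seg c hc (vert ++ ["E"]) (vert ++ ["W", "E"]) (vert ++ ["W"])]
    apply List.map_congr_left
    intro ci _
    split_ifs <;> rfl
  simp only [hrow]
  rw [pv_seg ((n : Int)) hr _ _ _]
  have hrows : (PySem.List.pyRange 0 ((n : Int)) 1).map
        (fun ri => if ri = 0 then
            (PySem.List.pyRange 0 c 1).map (fun ci => ["S"] ++ (if ci = 0 then ["E"] else if ci = c - 1 then ["W"] else ["W", "E"]))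
          else if ri = (n : Int) - 1 then
            (PySem.List.pyRange 0 c 1).map (fun ci => ["N"] ++ (if ci = 0 then ["E"] else if ci = c - 1 then ["W"] else ["W", "E"]))
          else
            (PySem.List.pyRange 0 c 1).map (fun ci => ["N", "S"] ++ (if ci = 0 then ["E"] else if ci = c - 1 then ["W"] else ["W", "E"])))
      = (PySem.List.pyRange 0 ((n : Int)) 1).map
          (fun ri => (PySem.List.pyRange 0 c 1).map
            (fun ci => (if ri = 0 then ["S"] else if ri = (n : Int) - 1 then ["N"] else ["N", "S"])
              ++ (if ci = 0 then ["E"] else if ci = c - 1 then ["W"] else ["W", "E"]))) := by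
    apply List.map_congr_left
    intro ri _
    split_ifs <;> rfl
  rw [hrows, ← List.flatMap_def]
  rw [pv_enum_flat c (by omega)
    (fun ri ci => (if ri = 0 then ["S"] else if ri = (n : Int) - 1 then ["N"] else ["N", "S"])
      ++ (if ci = 0 then ["E"] else if ci = c - 1 then ["W"] else ["W", "E"])) n]
  exact pv_items_pairs (n : Int) c (by omega) (by omega) _ _

theorem pv_b_torus (r c : Int) (hr : 1 ≤ r) (hc : 1 ≤ c) :
    available_ports_alt "torus" r c = pvPairs r c (fun _ => ["N", "S"]) (fun _ => ["W", "E"]) := by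
  have hmr : max r 0 = r := by omega
  have hmc : max c 0 = c := by omega
  simp only [available_ports_alt, hmr, hmc, reduceIte]
  rw [show PySem.List.pyRange 0 (r * c) 1
      = (pvPairs r c (fun _ => ["N", "S"]) (fun _ => ["W", "E"])).map Prod.fst from
    (pv_pairs_keys r c (by omega) (by omega) _ _).symm, List.foldl_map]
  rw [PySem.Dict.items_foldl_insert_fresh _ Prod.fst (fun _ => ["N", "S", "W", "E"]) PySem.Dict.empty
    (fun a _ => PySem.Dict.contains_empty _)
    (by rw [pv_pairs_keys r c (by omega) (by omega)]; exact PySem.List.nodup_pyRange_one _ _)]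
  unfold pvPairs
  simp [PySem.Dict.empty, List.map_flatMap, List.map_map, Function.comp_def]

-- degenerate grids (r ≤ 0 or c ≤ 0): both sides give the empty dict
theorem pv_a_empty (t : String) (r c : Int) (h : r ≤ 0 ∨ c ≤ 0) :
    available_ports t r c = [] := by
  have hemp : (PySem.Dict.empty : PySem.Dict Int (List String)).items = [] := by
    simp [PySem.Dict.empty]
  rcases le_or_gt r 0 with hr | hr
  · have hnm : network_matrix r c = [] := by
      rw [pv_netmat, show r.toNat = 0 by omega]
      rfl
    simp only [available_ports, hnm, List.length_nil, Nat.cast_zero]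
    rw [PySem.List.pyRange_one_eq_nil (le_refl 0)]
    simp only [List.foldl_nil]
    split_ifs <;> exact hemp
  · have hc : c ≤ 0 := by omega
    have hc0 : ((c.toNat : Int)) = 0 := by omega
    have hget : ∀ ri : Int, 0 ≤ ri → ri < (r.toNat : Int) →
        ((PySem.List.pyGetD (network_matrix r c) ri ([] : List Int)).length : Int) = 0 := by
      intro ri h0 h1
      rw [pv_net_get r c ri h0 h1, hc0]
      rw [PySem.List.pyRange_one_eq_nil (by omega)]
      rfl
    simp only [available_ports]
    split_ifs
    · rw [pv_net_len,
        PySem.List.foldl_congr_mem _ _ (fun d _ => d) _ (by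
          intro acc ri hri
          rw [PySem.List.mem_pyRange_one] at hri
          rw [hget ri hri.1 hri.2, PySem.List.pyRange_one_eq_nil (le_refl 0)]
          rfl),
        List.foldl_fixed]
      exact hemp
    · rw [pv_net_len,
        PySem.List.foldl_congr_mem _ _ (fun d _ => d) _ (by
          intro acc ri hri
          rw [PySem.List.mem_pyRange_one] at hri
          rw [hget ri hri.1 hri.2, PySem.List.pyRange_one_eq_nil (le_refl 0)]
          rfl),
        List.foldl_fixed]
      exact hemp
    · rfl

theorem pv_b_empty (t : String) (r c : Int) (h : r ≤ 0 ∨ c ≤ 0) :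
    available_ports_alt t r c = [] := by
  have hemp : (PySem.Dict.empty : PySem.Dict Int (List String)).items = [] := by
    simp [PySem.Dict.empty]
  have hprod : max r 0 * max c 0 = 0 := by
    rcases h with h | h
    · rw [show max r 0 = 0 by omega, zero_mul]
    · rw [show max c 0 = 0 by omega, mul_zero]
  simp only [available_ports_alt]
  by_cases h1 : t = "torus"
  · rw [if_pos h1, hprod, PySem.List.pyRange_one_eq_nil (le_refl 0)]
    simp only [List.foldl_nil]
    exact hemp
  · rw [if_neg h1, if_pos (by
      rcases h with h | h
      · exact Or.inr (Or.inl (by omega))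
      · exact Or.inr (Or.inr (by omega)))]

-- ===== VERDICT (by name: the statement is the Claim_ definition above) =====
theorem available_ports_spec : Claim_equal_available_ports := by
  intro topology r c _
  unfold Spec_available_ports
  by_cases hdeg : r ≤ 0 ∨ c ≤ 0
  · rw [pv_a_empty topology r c hdeg, pv_b_empty topology r c hdeg]
  · rw [not_or, not_le, not_le] at hdeg
    by_cases h1 : topology = "torus"
    · subst h1
      rw [pv_a_torus r c (by omega) (by omega), pv_b_torus r c (by omega) (by omega)]
    · by_cases h2 : topology = "mesh"
      · subst h2
        rw [pv_a_mesh r c (by omega) (by omega), pv_b_mesh r c (by omega) (by omega)]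
      · simp [available_ports, available_ports_alt, h1, h2]
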